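-- pv_equiv track=rewrite | github.com/jyshtty/DSA_Bundled | Prime_numbers/Assessment/odd_fibonacci/test.py | foo
-- ===== SOURCE A (Python) =====
-- def foo(A):
-- 	flag = A[0]
-- 	count = 1
-- 	ls = []
-- 	for i in range(1,len(A)):
-- 		if flag == A[i]:
-- 			count += 1
-- 		else:
-- 			ls.append(count)
-- 			count = 1
-- 			flag = A[i]
-- 		if i == len(A) -1:
-- 			ls.append(count)
-- 	max_len = max(ls)
-- 	sum = 0
-- 	for i in ls:
-- 		if i < max_len:
-- 			sum = sum + (max_len - i)
-- 	return sum, ls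
-- ===== SOURCE B (Python) =====
-- def foo(A):
--     n = len(A)
--     cuts = [i for i in range(1, n) if A[i] != A[i - 1]]
--     edges = [0] + cuts + [n]
--     ls = [edges[k + 1] - edges[k] for k in range(len(edges) - 1)]
--     max_len = max(ls)
--     return max_len * len(ls) - sum(ls), ls
-- ===== Notes on version B (the rewrite author's own statement) =====
-- stated objective: alternative
-- what changed: B replaces A's stateful flag/count loop by computing the run-boundary indices with an index filter and taking differences of consecutive boundaries, and replaces A's second summing loop by the closed form max_len*len(ls) - sum(ls).
-- outside the precondition, e.g. on foo([]): A raises IndexError, B returns (0, [0]); on foo([5]): A raises ValueError, B returns (0, [1])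
import Mathlib
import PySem

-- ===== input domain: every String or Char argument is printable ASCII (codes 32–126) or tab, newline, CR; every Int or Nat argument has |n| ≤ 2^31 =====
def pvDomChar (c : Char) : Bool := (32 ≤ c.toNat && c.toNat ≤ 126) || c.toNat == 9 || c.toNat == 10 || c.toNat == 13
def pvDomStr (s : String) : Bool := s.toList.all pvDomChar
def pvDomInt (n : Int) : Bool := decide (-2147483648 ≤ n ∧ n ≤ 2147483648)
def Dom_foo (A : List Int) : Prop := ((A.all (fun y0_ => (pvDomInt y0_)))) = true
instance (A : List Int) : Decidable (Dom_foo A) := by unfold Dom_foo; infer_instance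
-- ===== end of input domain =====

-- B computes run lengths as differences of consecutive run-boundary indices and folds the
-- second loop into the closed form max_len*len(ls) - sum(ls); same cost, different algorithm.

-- ===== PORT A =====
-- loop body of A's single for-loop (the state is (flag, count, ls))
def fooBody (A : List Int) (st : Int × Int × List Int) (i : Int) : Int × Int × List Int :=
  let flag := st.1
  let count := st.2.1
  let ls := st.2.2
  let st' :=
    if flag = PySem.List.pyGetD A i 0 then (flag, count + 1, ls)
    else (PySem.List.pyGetD A i 0, (1 : Int), ls ++ [count])
  if i = (A.length : Int) - 1 then (st'.1, st'.2.1, st'.2.2 ++ [st'.2.1]) else st'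

def foo (A : List Int) : Int × List Int :=
  let st := (PySem.List.pyRange 1 (A.length : Int) 1).foldl (fooBody A)
              (PySem.List.pyGetD A 0 0, (1 : Int), ([] : List Int))
  let ls := st.2.2
  let maxLen := (PySem.List.max? ls (fun x => x)).getD 0
  let s := ls.foldl (fun s i => if i < maxLen then s + (maxLen - i) else s) 0
  (s, ls)

-- ===== PORT B =====
def foo_alt (A : List Int) : Int × List Int :=
  let n : Int := A.length
  let cuts := (PySem.List.pyRange 1 n 1).filter
    (fun i => decide (¬ PySem.List.pyGetD A i 0 = PySem.List.pyGetD A (i - 1) 0))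
  let edges := [(0 : Int)] ++ cuts ++ [n]
  let ls := (PySem.List.pyRange 0 ((edges.length : Int) - 1) 1).map
    (fun k => PySem.List.pyGetD edges (k + 1) 0 - PySem.List.pyGetD edges k 0)
  let maxLen := (PySem.List.max? ls (fun x => x)).getD 0
  (maxLen * ls.length - ls.sum, ls)

-- ===== PRECONDITION & SPEC =====
-- A raises on lists of length < 2 (IndexError on [], ValueError from max([]) on singletons)
def Pre_foo (A : List Int) : Prop := 2 ≤ A.length
instance (A : List Int) : Decidable (Pre_foo A) := by unfold Pre_foo; infer_instance
def pvWitness_foo : List Int := [1, 1, 2]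

def Spec_foo (A : List Int) (out : Int × List Int) : Prop := out = foo_alt A
instance (A : List Int) (out : Int × List Int) : Decidable (Spec_foo A out) := by unfold Spec_foo; infer_instance

-- ===== CLAIM (what is proved, stated in full; the proofs are below) =====
def Claim_equal_foo : Prop := ∀ (A : List Int), Dom_foo A → Pre_foo A → Spec_foo A (foo A)

-- ===== LEMMAS AND PROOFS =====

-- boundary indices among 1..m : i is a cut iff A[i] ≠ A[i-1]
def cutsN (A : List Int) (m : Nat) : List Nat :=
  (List.range' 1 m).filter (fun i => decide (¬ A.getD i 0 = A.getD (i - 1) 0))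

-- last element of a Nat list, 0 for []
def lastE (xs : List Nat) : Nat := xs.foldl (fun _ x => x) 0

-- consecutive differences, starting from p
def diffs (p : Int) : List Int → List Int
  | [] => []
  | e :: es => (e - p) :: diffs e es

-- the common run-length list both programs compute (for A.length ≥ 2)
def runsOf (A : List Int) : List Int :=
  diffs 0 ((cutsN A (A.length - 1)).map (fun (k : Nat) => (k : Int)) ++ [(A.length : Int)])

lemma lastE_append (xs : List Nat) (x : Nat) : lastE (xs ++ [x]) = x := by
  simp [lastE]

lemma foldl_last_natCast (xs : List Nat) (a : Nat) :
    ((xs.map (fun (k : Nat) => (k : Int))).foldl (fun _ x => x) (a : Int)) =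
      ((xs.foldl (fun _ x => x) a : Nat) : Int) := by
  induction xs generalizing a with
  | nil => rfl
  | cons y t ih => simpa using ih y

lemma diffs_append_singleton (p : Int) (xs : List Int) (e : Int) :
    diffs p (xs ++ [e]) = diffs p xs ++ [e - xs.foldl (fun _ x => x) p] := by
  induction xs generalizing p with
  | nil => rfl
  | cons y t ih => simp [diffs, ih]

lemma diffs_length (p : Int) (es : List Int) : (diffs p es).length = es.length := by
  induction es generalizing p with
  | nil => rfl
  | cons e t ih => simp [diffs, ih]

lemma cutsN_succ (A : List Int) (m : Nat) :
    cutsN A (m + 1) =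
      cutsN A m ++ (if A.getD (m + 1) 0 = A.getD m 0 then [] else [m + 1]) := by
  unfold cutsN
  rw [List.range'_1_concat, List.filter_append]
  by_cases h : A.getD (m + 1) 0 = A.getD m 0 <;>
    simp only [List.getD_eq_getElem?_getD] at h <;> simp [Nat.add_comm, h]

lemma loopA_inv (A : List Int) (m : Nat) (hm : m + 1 < A.length) :
    (PySem.List.pyRange 1 ((m : Int) + 1) 1).foldl (fooBody A)
        (PySem.List.pyGetD A 0 0, (1 : Int), ([] : List Int)) =
      (A.getD m 0, (m : Int) + 1 - (lastE (cutsN A m) : Int),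
        diffs 0 ((cutsN A m).map (fun (k : Nat) => (k : Int)))) := by
  induction m with
  | zero => simp [cutsN, lastE, diffs, PySem.List.pyRange_one_eq_nil, PySem.List.pyGetD_zero]
  | succ m ih =>
    have hm' : m + 1 < A.length := by omega
    push_cast
    rw [
        PySem.List.pyRange_one_succ_right (a := 1) (b := (m : Int) + 1) (by omega),
        List.foldl_append, ih hm']
    simp only [List.foldl_cons, List.foldl_nil]
    unfold fooBody
    simp only []
    have hcast : (m : Int) + 1 = ((m + 1 : Nat) : Int) := by push_cast; ring
    rw [hcast, PySem.List.pyGetD_natCast]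
    have hguard : ¬ ((m + 1 : Nat) : Int) = (A.length : Int) - 1 := by
      push_cast; omega
    rw [if_neg hguard]
    by_cases hq : A.getD (m + 1) 0 = A.getD m 0
    · rw [if_pos (by simpa using hq.symm)]
      rw [cutsN_succ, if_pos hq]
      simp only [List.append_nil, Prod.mk.injEq]
      exact ⟨hq.symm, by push_cast; ring, trivial⟩
    · rw [if_neg (by simpa using fun hc => hq hc.symm)]
      rw [cutsN_succ, if_neg hq]
      simp only [Prod.mk.injEq]
      refine ⟨trivial, ?_, ?_⟩
      · rw [lastE_append]; push_cast; ring
      · rw [List.map_append, List.map_singleton, diffs_append_singleton,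
            show ((0 : Int) = ((0 : Nat) : Int)) from rfl, foldl_last_natCast]
        push_cast
        rfl

lemma fooLs (A : List Int) (h : 2 ≤ A.length) :
    ((PySem.List.pyRange 1 (A.length : Int) 1).foldl (fooBody A)
        (PySem.List.pyGetD A 0 0, (1 : Int), ([] : List Int))).2.2 = runsOf A := by
  obtain ⟨m, hlen⟩ : ∃ m, A.length = m + 2 := ⟨A.length - 2, by omega⟩
  have hcast : (A.length : Int) = ((m : Int) + 1) + 1 := by rw [hlen]; push_cast; ring
  rw [hcast, PySem.List.pyRange_one_succ_right (a := 1) (b := (m : Int) + 1) (by omega),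
      List.foldl_append, loopA_inv A m (by omega), List.foldl_cons, List.foldl_nil]
  unfold fooBody
  simp only []
  have hc1 : (m : Int) + 1 = ((m + 1 : Nat) : Int) := by push_cast; ring
  rw [hc1, PySem.List.pyGetD_natCast]
  rw [if_pos (show ((m + 1 : Nat) : Int) = (A.length : Int) - 1 by omega)]
  have hruns : runsOf A =
      diffs 0 ((cutsN A (m + 1)).map (fun (k : Nat) => (k : Int)) ++ [(A.length : Int)]) := by
    unfold runsOf
    rw [show A.length - 1 = m + 1 by omega]
  by_cases hq : A.getD m 0 = A.getD (m + 1) 0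
  · rw [if_pos hq]
    simp only []
    rw [hruns, cutsN_succ, if_pos hq.symm, List.append_nil, diffs_append_singleton,
        show ((0 : Int) = ((0 : Nat) : Int)) from rfl, foldl_last_natCast]
    simp only [lastE]
    congr 2
    omega
  · rw [if_neg hq]
    simp only []
    rw [hruns, cutsN_succ, if_neg (fun hc => hq hc.symm), List.map_append, List.map_singleton,
        List.append_assoc, diffs_append_singleton, List.foldl_append]
    simp only [List.foldl_cons, List.foldl_nil]
    rw [diffs_append_singleton, show ((0 : Int) = ((0 : Nat) : Int)) from rfl, foldl_last_natCast]
    simp only [lastE, List.append_assoc]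
    congr 3
    omega

lemma diffs_index (p : Int) (es : List Int) :
    (List.range es.length).map
        (fun k => (p :: es).getD (k + 1) 0 - (p :: es).getD k 0) = diffs p es := by
  induction es generalizing p with
  | nil => rfl
  | cons e t ih =>
    simp only [List.length_cons, List.range_succ_eq_map, List.map_cons, List.map_map]
    simp [diffs, Function.comp, ← ih e]

lemma cutsB_eq (A : List Int) (h : 1 ≤ A.length) :
    (PySem.List.pyRange 1 (A.length : Int) 1).filter
        (fun i => decide (¬ PySem.List.pyGetD A i 0 = PySem.List.pyGetD A (i - 1) 0)) =
      (cutsN A (A.length - 1)).map (fun (k : Nat) => (k : Int)) := by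
  rw [PySem.List.pyRange_one, show ((A.length : Int) - 1).toNat = A.length - 1 by omega,
      List.filter_map]
  unfold cutsN
  rw [List.range'_eq_map_range, List.filter_map]
  have hpred : ((fun i => decide (¬ PySem.List.pyGetD A i 0 = PySem.List.pyGetD A (i - 1) 0)) ∘
        fun (k : Nat) => 1 + (k : Int)) =
      ((fun i => decide (¬ A.getD i 0 = A.getD (i - 1) 0)) ∘ fun (x : Nat) => 1 + x) := by
    funext k
    simp only [Function.comp]
    simp only [show (1 : Int) + (k : Int) - 1 = ((k : Nat) : Int) by ring]
    simp only [show (1 : Int) + (k : Int) = ((1 + k : Nat) : Int) by push_cast; ring]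
    simp only [PySem.List.pyGetD_natCast]
    simp only [show (1 + k) - 1 = k by omega]
  rw [hpred, List.map_map]
  apply List.map_congr_left
  intro k _
  simp only [Function.comp]
  push_cast
  ring

lemma index_map (p : Int) (es : List Int) :
    (PySem.List.pyRange 0 (((p :: es).length : Int) - 1) 1).map
      (fun k => PySem.List.pyGetD (p :: es) (k + 1) 0 - PySem.List.pyGetD (p :: es) k 0) =
      diffs p es := by
  rw [show (((p :: es).length : Int) - 1) = ((es.length : Nat) : Int) by simp,
      PySem.List.pyRange_zero_natCast, List.map_map]
  rw [← diffs_index p es]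
  apply List.map_congr_left
  intro k _
  simp only [Function.comp]
  rw [show ((k : Nat) : Int) + 1 = ((k + 1 : Nat) : Int) by push_cast; ring,
      PySem.List.pyGetD_natCast, PySem.List.pyGetD_natCast]

lemma foo_alt_eq (A : List Int) (h : 2 ≤ A.length) :
    foo_alt A =
      ((PySem.List.max? (runsOf A) (fun x => x)).getD 0 * (runsOf A).length - (runsOf A).sum,
        runsOf A) := by
  have hcuts := cutsB_eq A (by omega)
  simp only [foo_alt]
  rw [hcuts]
  rw [show ([(0 : Int)] ++ (cutsN A (A.length - 1)).map (fun (k : Nat) => (k : Int)) ++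
        [(A.length : Int)]) = (0 : Int) ::
        ((cutsN A (A.length - 1)).map (fun (k : Nat) => (k : Int)) ++ [(A.length : Int)]) by simp]
  rw [index_map]
  unfold runsOf
  rfl

lemma sum_fold (m : Int) (ls : List Int) (s : Int) (h : ∀ i ∈ ls, i ≤ m) :
    ls.foldl (fun s i => if i < m then s + (m - i) else s) s = s + m * ls.length - ls.sum := by
  induction ls generalizing s with
  | nil => simp
  | cons i t ih =>
    have hi : i ≤ m := h i (by simp)
    have ht : ∀ j ∈ t, j ≤ m := fun j hj => h j (by simp [hj])
    have hstep : (if i < m then s + (m - i) else s) = s + (m - i) := by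
      rcases lt_or_eq_of_le hi with h' | h'
      · simp [h']
      · simp [h']
    simp only [List.foldl_cons, hstep, ih _ ht, List.length_cons, List.sum_cons]
    push_cast
    ring

lemma runsOf_ne_nil (A : List Int) : runsOf A ≠ [] := by
  have := diffs_length 0 ((cutsN A (A.length - 1)).map (fun (k : Nat) => (k : Int)) ++ [(A.length : Int)])
  intro hc
  unfold runsOf at hc
  rw [hc] at this
  simp at this

-- ===== VERDICT (by name: the statement is the Claim_ definition above) =====
theorem foo_spec : Claim_equal_foo := by
  intro A _ hpre
  unfold Spec_foo
  unfold Pre_foo at hpre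
  rw [foo_alt_eq A hpre]
  simp only [foo, fooLs A hpre]
  obtain ⟨mx, hmx⟩ : ∃ mx, PySem.List.max? (runsOf A) (fun x => x) = some mx := by
    cases hx : PySem.List.max? (runsOf A) (fun x => x) with
    | none => exact absurd ((PySem.List.max?_eq_none_iff _ _).mp hx) (runsOf_ne_nil A)
    | some m => exact ⟨m, rfl⟩
  have hle : ∀ i ∈ runsOf A, i ≤ (PySem.List.max? (runsOf A) (fun x => x)).getD 0 := by
    intro i hi
    rw [hmx]
    exact PySem.List.max?_isMax hmx i hi
  rw [sum_fold _ _ _ hle]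
  simp
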